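-- pv_equiv track=rewrite | github.com/b21727738/-dev-test | assign3/assignment3.py | binaryCript
-- ===== SOURCE A (Python) =====
-- def binaryCript(x):
--     temp = list(x)
--     temp.remove(temp[0])
--     sum = 0
--     for i in range(0,len(temp)):
--         if temp[i]=="0":
--             temp[i] = "1"
--         else:
--             temp[i] = "0"
--     temp = temp[::-1]
--     for k in range(0,len(temp)):
--         if temp[k] == "1":
--             sum += 2 ** k
--     return sum
-- ===== SOURCE B (Python) =====
-- def binaryCript(x):
--     result = 0
--     for c in x[1:]:
--         result = result * 2 + (1 if c == "0" else 0)
--     return result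
-- ===== Notes on version B (the rewrite author's own statement) =====
-- stated objective: simpler
-- what changed: Single left-to-right Horner pass (result = result*2 + bit) over x[1:] replaces A's three passes (in-place flip loop, list reversal, and a 2**k power-sum loop).
import Mathlib
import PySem

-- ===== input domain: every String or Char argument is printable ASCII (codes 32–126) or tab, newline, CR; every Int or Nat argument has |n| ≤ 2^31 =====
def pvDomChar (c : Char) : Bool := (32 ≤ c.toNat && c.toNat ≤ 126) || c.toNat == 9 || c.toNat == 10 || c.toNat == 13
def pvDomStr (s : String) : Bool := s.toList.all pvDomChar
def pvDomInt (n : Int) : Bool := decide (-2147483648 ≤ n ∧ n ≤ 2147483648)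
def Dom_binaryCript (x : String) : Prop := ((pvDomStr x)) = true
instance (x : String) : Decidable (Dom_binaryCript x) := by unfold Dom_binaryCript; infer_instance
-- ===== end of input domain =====

-- B is a single Horner pass over x[1:] instead of A's flip pass + reversal + 2**k power-sum loop (simpler; return value only).

-- ===== PORT A =====
-- the second loop: for k in range(0,len(temp)): if temp[k]=="1": sum += 2**k
def pvSumLoopA : List Char → Nat → Int → Int
  | [], _, s => s
  | c :: rest, k, s => pvSumLoopA rest (k + 1) (if c = '1' then s + 2 ^ k else s)

def binaryCript (x : String) : Int :=
  let temp := x.toList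
  match temp with
  | [] => 0      -- temp[0] raises IndexError in Python; excluded by Pre_binaryCript
  | h :: _ =>
    -- temp.remove(temp[0]) : remove the first occurrence of the head
    let temp1 := (PySem.List.remove? temp h).getD temp
    -- first loop: in-place flip of each position i
    let temp2 := temp1.map (fun c => if c = '0' then '1' else '0')
    -- temp = temp[::-1]
    let temp3 := temp2.reverse
    pvSumLoopA temp3 0 0

-- ===== PORT B =====
def binaryCript_alt (x : String) : Int :=
  -- x[1:] is x.toList.drop 1 (exact); Horner fold over the characters
  (x.toList.drop 1).foldl (fun r c => r * 2 + (if c = '0' then 1 else 0)) 0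

-- ===== PRECONDITION & SPEC =====
-- Pre_ excludes exactly the empty string, where A raises IndexError on temp[0].
def Pre_binaryCript (x : String) : Prop := x ≠ ""
instance (x : String) : Decidable (Pre_binaryCript x) := by unfold Pre_binaryCript; infer_instance
def pvWitness_binaryCript : String := "0101"

def Spec_binaryCript (x : String) (out : Int) : Prop := out = binaryCript_alt x
instance (x : String) (out : Int) : Decidable (Spec_binaryCript x out) := by unfold Spec_binaryCript; infer_instance

-- ===== CLAIM (what is proved, stated in full; the proofs are below) =====
def Claim_equal_binaryCript : Prop := ∀ (x : String), Dom_binaryCript x → Pre_binaryCript x → Spec_binaryCript x (binaryCript x)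

-- ===== LEMMAS AND PROOFS =====

lemma pvSumLoopA_acc (l : List Char) (k : Nat) (s : Int) :
    pvSumLoopA l k s = s + pvSumLoopA l k 0 := by
  induction l generalizing k s with
  | nil => simp [pvSumLoopA]
  | cons c rest ih =>
    simp only [pvSumLoopA]
    rw [ih (k + 1), ih (k + 1) (if c = '1' then 0 + 2 ^ k else 0)]
    split_ifs <;> ring

lemma pvSumLoopA_append (l : List Char) (c : Char) (k : Nat) :
    pvSumLoopA (l ++ [c]) k 0 =
      pvSumLoopA l k 0 + (if c = '1' then 2 ^ (k + l.length) else 0) := by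
  induction l generalizing k with
  | nil => simp [pvSumLoopA, pvSumLoopA_acc]
  | cons d rest ih =>
    simp only [List.cons_append, pvSumLoopA, List.length_cons]
    have hlen : k + 1 + rest.length = k + (rest.length + 1) := by omega
    rw [pvSumLoopA_acc (rest ++ [c]) (k + 1), ih (k + 1),
      pvSumLoopA_acc rest (k + 1) (if d = '1' then 0 + 2 ^ k else 0), hlen]
    split_ifs <;> ring

lemma pvHorner_acc (l : List Char) (r : Int) :
    l.foldl (fun r c => r * 2 + (if c = '0' then 1 else 0)) r =
      r * 2 ^ l.length + l.foldl (fun r c => r * 2 + (if c = '0' then 1 else 0)) 0 := by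
  induction l generalizing r with
  | nil => simp
  | cons c rest ih =>
    simp only [List.foldl_cons, List.length_cons]
    rw [ih, ih (0 * 2 + (if c = '0' then 1 else 0))]
    split_ifs <;> ring

lemma pv_main (t : List Char) :
    pvSumLoopA ((t.map (fun c => if c = '0' then '1' else '0')).reverse) 0 0 =
      t.foldl (fun r c => r * 2 + (if c = '0' then 1 else 0)) 0 := by
  induction t with
  | nil => simp [pvSumLoopA]
  | cons c rest ih =>
    simp only [List.map_cons, List.reverse_cons, List.foldl_cons]
    rw [pvSumLoopA_append, ih, pvHorner_acc rest (0 * 2 + (if c = '0' then 1 else 0))]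
    have hflip : ((if c = '0' then '1' else '0') = '1') ↔ (c = '0') := by
      split_ifs with h <;> simp [h]
    simp only [List.length_reverse, List.length_map]
    by_cases h : c = '0'
    · simp [h]; ring
    · simp [h]

-- ===== VERDICT (by name: the statement is the Claim_ definition above) =====
theorem binaryCript_spec : Claim_equal_binaryCript := by
  intro x _ hpre
  unfold Spec_binaryCript binaryCript binaryCript_alt
  have hx : x.toList ≠ [] := by
    simp [String.toList_eq_nil_iff] at *
    exact hpre
  cases hlist : x.toList with
  | nil => exact absurd hlist hx
  | cons h t =>
    simp only [PySem.List.remove?_cons_self, Option.getD_some, List.drop_succ_cons,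
      List.drop_zero]
    exact pv_main t
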